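-- pv_equiv track=rewrite | github.com/rangat/whAnalysis | helper.py | emb_seq
-- ===== SOURCE A (Python) =====
-- def emb_seq(start_wh:list, rel_clause) -> bool:
--     hit_rel = False
--     hit_v = False
--     hit_rel_after_v = False
--
--     for word, pos in start_wh:
--         if pos in rel_clause: # Has hit the relative clause
--             hit_rel = True
--         elif hit_rel and 'V' in pos:
--             hit_v = True
--         if hit_rel and hit_v and pos in rel_clause:
--             hit_rel_after_v = True
--
--     if hit_v and hit_rel and not hit_rel_after_v:
--
--         return True
--
--     return False
-- ===== SOURCE B (Python) =====
-- def emb_seq(start_wh: list, rel_clause) -> bool: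
--     rel = set(rel_clause)
--     marks = [i for i, (word, pos) in enumerate(start_wh) if pos in rel]
--     verbs = [i for i, (word, pos) in enumerate(start_wh)
--              if pos not in rel and 'V' in pos]
--     if not marks:
--         return False
--     first, last = marks[0], marks[-1]
--     return any(j > last for j in verbs) and all(not (first < j < last) for j in verbs)
-- ===== Notes on version B (the rewrite author's own statement) =====
-- stated objective: faster
-- what changed: Replaced A's three-boolean flag state machine (with a list-membership test per element) by an index-set formulation: hash the markers into a set once, collect the positions of all markers and of all non-marker verb tags, then decide by interval comparisons (some verb after the last marker, no verb strictly between first and last marker).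
import Mathlib
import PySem

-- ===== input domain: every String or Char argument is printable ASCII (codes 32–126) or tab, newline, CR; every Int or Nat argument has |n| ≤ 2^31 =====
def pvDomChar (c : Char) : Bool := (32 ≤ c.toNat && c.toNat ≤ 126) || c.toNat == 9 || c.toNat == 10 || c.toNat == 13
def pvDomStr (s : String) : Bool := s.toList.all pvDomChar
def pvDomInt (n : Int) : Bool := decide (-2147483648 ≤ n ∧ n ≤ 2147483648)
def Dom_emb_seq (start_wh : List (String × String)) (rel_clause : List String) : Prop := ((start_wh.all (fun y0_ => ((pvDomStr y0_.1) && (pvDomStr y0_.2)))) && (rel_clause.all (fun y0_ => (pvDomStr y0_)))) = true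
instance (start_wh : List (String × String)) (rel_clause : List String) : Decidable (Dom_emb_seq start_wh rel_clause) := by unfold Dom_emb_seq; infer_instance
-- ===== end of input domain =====

-- B replaces A's three-boolean flag state machine by an index-set formulation:
-- markers hashed into a set, positions of markers and of non-marker verb tags
-- collected, decision by interval comparisons; objective: faster (set lookup
-- replaces the per-element list scan).

-- ===== PORT A =====
-- one loop iteration of A: state (hit_rel, hit_v, hit_rel_after_v), tag pos
def stepA (rel : List String) (s : Bool × Bool × Bool) (pos : String) : Bool × Bool × Bool :=
  let hit_rel := if rel.contains pos then true else s.1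
  let hit_v := if rel.contains pos then s.2.1
               else if s.1 && PySem.Str.isIn "V" pos then true else s.2.1
  let hit_rel_after_v :=
    if hit_rel && hit_v && rel.contains pos then true else s.2.2
  (hit_rel, hit_v, hit_rel_after_v)

def emb_seq (start_wh : List (String × String)) (rel_clause : List String) : Bool :=
  let st := start_wh.foldl (fun s wp => stepA rel_clause s wp.2) (false, false, false)
  if st.2.1 && st.1 && !st.2.2 then true else false

-- ===== PORT B =====
-- marks = [i for i,(word,pos) in enumerate(start_wh) if pos in rel_clause]
-- verbs = [i for i,(word,pos) in enumerate(start_wh) if pos not in rel_clause and 'V' in pos]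
def emb_seq_alt (start_wh : List (String × String)) (rel_clause : List String) : Bool :=
  let rel := PySem.Set.ofList rel_clause
  let marks := start_wh.zipIdx.filterMap
    (fun x => if PySem.Set.contains rel x.1.2 then some x.2 else none)
  let verbs := start_wh.zipIdx.filterMap
    (fun x => if !PySem.Set.contains rel x.1.2 && PySem.Str.isIn "V" x.1.2 then some x.2 else none)
  match marks with
  | [] => false
  | m0 :: _ =>
    let last := marks.getLastD 0
    (verbs.any fun j => decide (last < j)) &&
      (verbs.all fun j => !(decide (m0 < j) && decide (j < last)))

-- ===== PRECONDITION & SPEC =====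
def Spec_emb_seq (start_wh : List (String × String)) (rel_clause : List String) (out : Bool) : Prop := out = emb_seq_alt start_wh rel_clause
instance (start_wh : List (String × String)) (rel_clause : List String) (out : Bool) : Decidable (Spec_emb_seq start_wh rel_clause out) := by unfold Spec_emb_seq; infer_instance

-- ===== CLAIM =====
def Claim_equal_emb_seq : Prop := ∀ (start_wh : List (String × String)) (rel_clause : List String), Dom_emb_seq start_wh rel_clause → Spec_emb_seq start_wh rel_clause (emb_seq start_wh rel_clause)

-- ===== LEMMAS AND PROOFS =====

-- index list of the positions (starting at k) whose tag satisfies f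
def mkIdx (f : String → Bool) (k : Nat) : List String → List Nat
  | [] => []
  | p :: ps => if f p then k :: mkIdx f (k + 1) ps else mkIdx f (k + 1) ps

theorem filterMap_zipIdx_eq_mkIdx (g : String → Bool)
    (sw : List (String × String)) (k : Nat) :
    (sw.zipIdx k).filterMap (fun x => if g x.1.2 then some x.2 else none)
      = mkIdx g k (sw.map (fun wp => wp.2)) := by
  induction sw generalizing k with
  | nil => rfl
  | cons wp sw ih =>
    by_cases h : g wp.2 <;> simp [List.zipIdx_cons, h, mkIdx, ih]

theorem mkIdx_shift (f : String → Bool) (k : Nat) (ps : List String) :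
    mkIdx f (k + 1) ps = (mkIdx f k ps).map (· + 1) := by
  induction ps generalizing k with
  | nil => rfl
  | cons p ps ih => by_cases h : f p <;> simp [mkIdx, h, ih]

theorem mkIdx_le (f : String → Bool) (k : Nat) (ps : List String) :
    ∀ m ∈ mkIdx f k ps, k ≤ m := by
  induction ps generalizing k with
  | nil => simp [mkIdx]
  | cons p ps ih =>
    intro m hm
    by_cases h : f p
    · simp only [mkIdx, h, if_pos, List.mem_cons] at hm
      rcases hm with h' | hm
      · omega
      · have := ih (k + 1) m hm; omega
    · simp only [mkIdx, h, Bool.false_eq_true, if_neg, not_false_eq_true] at hm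
      have := ih (k + 1) m hm; omega

theorem getLastD_mem : ∀ (l : List Nat), l ≠ [] → ∀ d : Nat, l.getLastD d ∈ l
  | [a], _, d => by simp
  | a :: b :: l, _, d => by
      rw [List.getLastD_cons]
      exact List.mem_cons_of_mem a (getLastD_mem (b :: l) (by simp) a)

theorem getLastD_irrel : ∀ (l : List Nat), l ≠ [] → ∀ d d' : Nat, l.getLastD d = l.getLastD d'
  | a :: l, _, d, d' => by rw [List.getLastD_cons, List.getLastD_cons]

theorem getLastD_map_succ' : ∀ (l : List Nat) (d : Nat),
    (l.map (· + 1)).getLastD (d + 1) = l.getLastD d + 1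
  | [], d => by simp
  | a :: l, d => by
      simp only [List.map_cons, List.getLastD_cons]
      exact getLastD_map_succ' l a

theorem getLastD_map_succ (l : List Nat) (h : l ≠ []) :
    (l.map (· + 1)).getLastD 0 = l.getLastD 0 + 1 := by
  rw [getLastD_irrel (l.map (· + 1)) (by simp [h]) 0 1]
  exact getLastD_map_succ' l 0

theorem mkIdx_le_last (f : String → Bool) (k : Nat) (ps : List String) :
    ∀ m ∈ mkIdx f k ps, m ≤ (mkIdx f k ps).getLastD 0 := by
  induction ps generalizing k with
  | nil => simp [mkIdx]
  | cons p ps ih =>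
    intro m hm
    by_cases h : f p
    · simp only [mkIdx, h, if_pos] at hm ⊢
      by_cases he : mkIdx f (k + 1) ps = []
      · rw [he] at hm ⊢
        simp only [List.mem_singleton] at hm
        subst hm
        simp
      · rw [List.getLastD_cons, getLastD_irrel _ he k 0]
        rcases List.mem_cons.mp hm with h' | hm'
        · have hmem := getLastD_mem _ he 0
          have := mkIdx_le f (k + 1) ps _ hmem
          omega
        · exact ih (k + 1) m hm'
    · simp only [mkIdx, h, Bool.false_eq_true, if_neg, not_false_eq_true] at hm ⊢
      exact ih (k + 1) m hm

-- a verb index is never a marker index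
theorem mkIdx_disjoint (f g : String → Bool) (hfg : ∀ p, f p = true → g p = false)
    (k : Nat) (ps : List String) :
    ∀ j ∈ mkIdx f k ps, j ∉ mkIdx g k ps := by
  induction ps generalizing k with
  | nil => simp [mkIdx]
  | cons p ps ih =>
    intro j hj
    by_cases hf : f p
    · have hg : g p = false := hfg p hf
      simp only [mkIdx, hf, if_pos, hg, Bool.false_eq_true, if_neg, not_false_eq_true] at hj ⊢
      rcases List.mem_cons.mp hj with h' | hj'
      · subst h'
        intro hc
        have := mkIdx_le g (j + 1) ps j hc
        omega
      · exact ih (k + 1) j hj'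
    · simp only [mkIdx, hf, Bool.false_eq_true, if_neg, not_false_eq_true] at hj
      by_cases hg : g p
      · simp only [mkIdx, hg, if_pos, List.mem_cons, not_or]
        refine ⟨?_, ih (k + 1) j hj⟩
        intro hc
        have := mkIdx_le f (k + 1) ps j hj
        omega
      · simp only [mkIdx, hg, Bool.false_eq_true, if_neg, not_false_eq_true]
        exact ih (k + 1) j hj

theorem mkIdx_eq_nil_iff (f : String → Bool) (k : Nat) (ps : List String) :
    mkIdx f k ps = [] ↔ ps.all (fun p => !f p) = true := by
  induction ps generalizing k with
  | nil => simp [mkIdx]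
  | cons p ps ih => by_cases h : f p <;> simp [mkIdx, h, ih]

-- tag predicates of the two programs
def isMarkT (rel : List String) (p : String) : Bool := rel.contains p
def isVerbT (rel : List String) (p : String) : Bool :=
  !rel.contains p && PySem.Str.isIn "V" p

-- A's final check
def checkA (s : Bool × Bool × Bool) : Bool := s.2.1 && s.1 && !s.2.2

-- absorbing state
theorem foldl_stepA_TTT (rel : List String) (ps : List String) :
    ps.foldl (stepA rel) (true, true, true) = (true, true, true) := by
  induction ps with
  | nil => rfl
  | cons p ps ih =>
    have h : stepA rel (true, true, true) p = (true, true, true) := by simp [stepA]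
    simp [List.foldl, h, ih]

theorem foldl_stepA_TTF (rel : List String) (ps : List String) :
    ps.foldl (stepA rel) (true, true, false) =
      (true, true, ps.any (fun p => rel.contains p)) := by
  induction ps with
  | nil => rfl
  | cons p ps ih =>
    by_cases h : p ∈ rel
    · have hs : stepA rel (true, true, false) p = (true, true, true) := by simp [stepA, h]
      simp [List.foldl, hs, foldl_stepA_TTT, h]
    · have hs : stepA rel (true, true, false) p = (true, true, false) := by simp [stepA, h]
      simp [List.foldl, hs, ih, h]

-- state (T,F,F): the rest succeeds iff some verb exists and every verb
-- comes after every marker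
theorem foldl_stepA_TFF (rel : List String) (ps : List String) :
    checkA (ps.foldl (stepA rel) (true, false, false)) =
      ((!(mkIdx (isVerbT rel) 0 ps).isEmpty) &&
        (mkIdx (isVerbT rel) 0 ps).all (fun j =>
          (mkIdx (isMarkT rel) 0 ps).all (fun m => decide (m < j)))) := by
  induction ps with
  | nil => rfl
  | cons p ps ih =>
    by_cases h : p ∈ rel
    · have hs : stepA rel (true, false, false) p = (true, false, false) := by simp [stepA, h]
      have hv : isVerbT rel p = false := by simp [isVerbT, h]
      have hm : isMarkT rel p = true := by simp [isMarkT, h]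
      simp only [List.foldl_cons, hs, ih, mkIdx, hv, Bool.false_eq_true, if_neg,
        not_false_eq_true, hm, if_pos, mkIdx_shift _ 0]
      simp [List.any_map, List.all_map, Function.comp_def, Nat.succ_lt_succ_iff]
    · by_cases hV : PySem.Chars.isIn ['V'] p.toList = true
      · have hs : stepA rel (true, false, false) p = (true, true, false) := by
          simp [stepA, h, hV]
        have hv : isVerbT rel p = true := by simp [isVerbT, h, hV]
        have hm : isMarkT rel p = false := by simp [isMarkT, h]
        rw [List.foldl_cons, hs, foldl_stepA_TTF]
        simp only [mkIdx, hv, if_pos, hm, Bool.false_eq_true, if_neg, not_false_eq_true,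
          mkIdx_shift _ 0, checkA]
        by_cases hmk : mkIdx (isMarkT rel) 0 ps = []
        · have hq : (ps.any fun q => decide (q ∈ rel)) = false := by
            rw [List.any_eq_false]
            intro q hq1
            have h2 := List.all_eq_true.mp ((mkIdx_eq_nil_iff _ 0 ps).mp hmk) q hq1
            simpa [isMarkT] using h2
          simp [hq, hmk]
        · have hq : (ps.any fun q => decide (q ∈ rel)) = true := by
            by_contra hc
            rw [Bool.not_eq_true, List.any_eq_false] at hc
            apply hmk
            rw [mkIdx_eq_nil_iff, List.all_eq_true]
            intro q hq1
            simpa [isMarkT] using hc q hq1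
          rcases List.exists_mem_of_ne_nil _ hmk with ⟨mw, hmw⟩
          have hne' : ((mkIdx (isMarkT rel) 0 ps).all fun _ => false) = false := by
            rw [List.all_eq_false]
            exact ⟨mw, hmw, by simp⟩
          simp [hq, hne']
      · have hs : stepA rel (true, false, false) p = (true, false, false) := by
          simp [stepA, h, hV]
        have hv : isVerbT rel p = false := by simp [isVerbT, h, hV]
        have hm : isMarkT rel p = false := by simp [isMarkT, h]
        simp only [List.foldl_cons, hs, ih, mkIdx, hv, Bool.false_eq_true, if_neg,
          not_false_eq_true, hm, mkIdx_shift _ 0]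
        simp [List.any_map, List.all_map, Function.comp_def, Nat.succ_lt_succ_iff]

-- B's decision formula over the tag list
def bFormula (rel : List String) (ps : List String) : Bool :=
  match mkIdx (isMarkT rel) 0 ps with
  | [] => false
  | m0 :: _ =>
    let marks := mkIdx (isMarkT rel) 0 ps
    let verbs := mkIdx (isVerbT rel) 0 ps
    let last := marks.getLastD 0
    (verbs.any fun j => decide (last < j)) &&
      (verbs.all fun j => !(decide (m0 < j) && decide (j < last)))

-- the TFF characterisation equals B's interval test once markers exist
theorem formula_equiv (rel : List String) (ps : List String)
    (hmk : mkIdx (isMarkT rel) 0 ps ≠ []) :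
    ((!(mkIdx (isVerbT rel) 0 ps).isEmpty) &&
      (mkIdx (isVerbT rel) 0 ps).all (fun j =>
        (mkIdx (isMarkT rel) 0 ps).all (fun m => decide (m < j))))
    = (((mkIdx (isVerbT rel) 0 ps).any
          (fun j => decide ((mkIdx (isMarkT rel) 0 ps).getLastD 0 < j))) &&
       ((mkIdx (isVerbT rel) 0 ps).all
          (fun j => !decide (j < (mkIdx (isMarkT rel) 0 ps).getLastD 0)))) := by
  have hlastmem : (mkIdx (isMarkT rel) 0 ps).getLastD 0 ∈ mkIdx (isMarkT rel) 0 ps :=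
    getLastD_mem _ hmk 0
  have hmax : ∀ m ∈ mkIdx (isMarkT rel) 0 ps, m ≤ (mkIdx (isMarkT rel) 0 ps).getLastD 0 :=
    mkIdx_le_last _ 0 ps
  have hdisj : ∀ j ∈ mkIdx (isVerbT rel) 0 ps, j ∉ mkIdx (isMarkT rel) 0 ps :=
    mkIdx_disjoint (isVerbT rel) (isMarkT rel)
      (fun p hp => by
        simp only [isVerbT, Bool.and_eq_true, Bool.not_eq_eq_eq_not, Bool.not_true] at hp
        exact hp.1) 0 ps
  cases hL : ((!(mkIdx (isVerbT rel) 0 ps).isEmpty) &&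
      (mkIdx (isVerbT rel) 0 ps).all (fun j =>
        (mkIdx (isMarkT rel) 0 ps).all (fun m => decide (m < j)))) with
  | true =>
    rw [Bool.and_eq_true] at hL
    rcases hL with ⟨hne, hall⟩
    rw [List.all_eq_true] at hall
    have hvne : mkIdx (isVerbT rel) 0 ps ≠ [] := by
      simpa [List.isEmpty_iff] using hne
    rcases List.exists_mem_of_ne_nil _ hvne with ⟨j0, hj0⟩
    have hgt : ∀ j ∈ mkIdx (isVerbT rel) 0 ps, (mkIdx (isMarkT rel) 0 ps).getLastD 0 < j := by
      intro j hj
      have := hall j hj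
      rw [List.all_eq_true] at this
      simpa using this _ hlastmem
    symm
    rw [Bool.and_eq_true]
    constructor
    · rw [List.any_eq_true]
      exact ⟨j0, hj0, by simpa using hgt j0 hj0⟩
    · rw [List.all_eq_true]
      intro j hj
      have := hgt j hj
      simp only [Bool.not_eq_eq_eq_not, Bool.not_true, decide_eq_false_iff_not]
      omega
  | false =>
    symm
    rw [Bool.and_eq_false_iff] at hL
    by_contra hc
    rw [Bool.not_eq_false, Bool.and_eq_true, List.any_eq_true, List.all_eq_true] at hc
    rcases hc with ⟨⟨j0, hj0, _⟩, hge⟩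
    rcases hL with hL | hL
    · simp only [Bool.not_eq_false', List.isEmpty_iff] at hL
      rw [hL] at hj0
      exact absurd hj0 List.not_mem_nil
    · rw [List.all_eq_false] at hL
      rcases hL with ⟨j, hj, hjf⟩
      rw [Bool.not_eq_true, List.all_eq_false] at hjf
      rcases hjf with ⟨m, hm, hmf⟩
      have h1 : ¬ m < j := by simpa using hmf
      have h2 : ¬ j < (mkIdx (isMarkT rel) 0 ps).getLastD 0 := by simpa using hge j hj
      have h3 : m ≤ (mkIdx (isMarkT rel) 0 ps).getLastD 0 := hmax m hm
      have h4 : j ≠ (mkIdx (isMarkT rel) 0 ps).getLastD 0 :=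
        fun hcc => (hdisj j hj) (hcc ▸ hlastmem)
      omega

theorem foldl_stepA_FFF (rel : List String) (ps : List String) :
    checkA (ps.foldl (stepA rel) (false, false, false)) = bFormula rel ps := by
  induction ps with
  | nil => rfl
  | cons p ps ih =>
    by_cases h : p ∈ rel
    · -- first marker found: switch to the TFF characterisation
      have hs : stepA rel (false, false, false) p = (true, false, false) := by simp [stepA, h]
      have hm : isMarkT rel p = true := by simp [isMarkT, h]
      have hv : isVerbT rel p = false := by simp [isVerbT, h]
      rw [List.foldl_cons, hs, foldl_stepA_TFF]
      unfold bFormula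
      by_cases hmk : mkIdx (isMarkT rel) 0 ps = []
      · -- p is the only marker
        simp only [mkIdx, hm, if_pos, hv, Bool.false_eq_true, if_neg, not_false_eq_true,
          mkIdx_shift _ 0, hmk, List.map_nil, List.getLastD_cons, List.getLastD_nil,
          List.all_nil]
        cases hvb : mkIdx (isVerbT rel) 0 ps with
        | nil => simp [hvb]
        | cons v vs =>
          simp [hvb, List.any_map, List.all_map, Function.comp_def]
      · -- later markers exist: use the interval characterisation
        rw [formula_equiv rel ps hmk]
        have hmapne : (mkIdx (isMarkT rel) 0 ps).map (· + 1) ≠ [] := by simp [hmk]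
        have hlast : (((mkIdx (isMarkT rel) 0 ps).map (· + 1)).getLastD 0)
            = ((mkIdx (isMarkT rel) 0 ps).getLastD 0) + 1 :=
          getLastD_map_succ _ hmk
        simp only [mkIdx, hm, if_pos, hv, Bool.false_eq_true, if_neg, not_false_eq_true,
          mkIdx_shift _ 0, List.getLastD_cons]
        rw [getLastD_irrel _ hmapne 0 0, hlast]
        simp [List.any_map, List.all_map, Function.comp_def, Nat.succ_lt_succ_iff]
    · have hs : stepA rel (false, false, false) p = (false, false, false) := by simp [stepA, h]
      have hm : isMarkT rel p = false := by simp [isMarkT, h]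
      rw [List.foldl_cons, hs, ih]
      unfold bFormula
      simp only [mkIdx, hm, Bool.false_eq_true, if_neg, not_false_eq_true, mkIdx_shift _ 0]
      cases hmm : mkIdx (isMarkT rel) 0 ps with
      | nil =>
        by_cases hV : isVerbT rel p = true <;> simp [hV]
      | cons m0 ms =>
        have hlast : ((m0 + 1) :: List.map (fun x => x + 1) ms).getLast?.getD 0
            = ((m0 :: ms).getLast?.getD 0) + 1 := by
          have := getLastD_map_succ (m0 :: ms) (by simp)
          simpa [List.getLastD_eq_getLast?] using this
        by_cases hV : isVerbT rel p = true
        · simp only [hV, if_pos, List.map_cons]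
          simp [List.any_map, List.all_map, Function.comp_def]
          rw [hlast]
          refine congrArg₂ (· && ·) ?_ ?_
          · exact List.any_congr rfl (fun x => by rw [decide_eq_decide]; omega)
          · exact List.all_congr rfl (fun x => by
              rcases Nat.lt_or_ge m0 x with hx | hx <;>
                rcases Nat.lt_or_ge x ((m0 :: ms).getLast?.getD 0) with hy | hy <;>
                simp_all)
        · simp only [hV, Bool.false_eq_true, if_neg, not_false_eq_true, List.map_cons]
          simp [List.any_map, List.all_map, Function.comp_def]
          rw [hlast]
          refine congrArg₂ (· && ·) ?_ ?_
          · exact List.any_congr rfl (fun x => by rw [decide_eq_decide]; omega)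
          · exact List.all_congr rfl (fun x => by
              rcases Nat.lt_or_ge m0 x with hx | hx <;>
                rcases Nat.lt_or_ge x ((m0 :: ms).getLast?.getD 0) with hy | hy <;>
                simp_all)

-- ===== VERDICT =====
theorem emb_seq_spec : Claim_equal_emb_seq := by
  intro start_wh rel _
  unfold Spec_emb_seq emb_seq emb_seq_alt
  have hmap : start_wh.foldl (fun s wp => stepA rel s wp.2) (false, false, false)
      = (start_wh.map (fun wp => wp.2)).foldl (stepA rel) (false, false, false) := by
    simp [List.foldl_map]
  have hset : ∀ p, PySem.Set.contains (PySem.Set.ofList rel) p = rel.contains p := by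
    intro p
    by_cases h : p ∈ rel <;>
      simp [PySem.Set.contains_eq_listContains, List.contains_eq_mem,
        PySem.Set.mem_ofList, h]
  simp only [hset]
  have hM := filterMap_zipIdx_eq_mkIdx (fun p => rel.contains p) start_wh 0
  have hVb := filterMap_zipIdx_eq_mkIdx (fun p => !rel.contains p && PySem.Str.isIn "V" p) start_wh 0
  have hA := foldl_stepA_FFF rel (start_wh.map (fun wp => wp.2))
  rw [← hmap] at hA
  simp only [checkA] at hA
  simp only [hM, hVb]
  rw [show (fun p => rel.contains p) = isMarkT rel from rfl,
      show (fun p => !rel.contains p && PySem.Str.isIn "V" p) = isVerbT rel from rfl]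
  rw [show (if ((start_wh.foldl (fun s wp => stepA rel s wp.2) (false, false, false)).2.1 &&
        (start_wh.foldl (fun s wp => stepA rel s wp.2) (false, false, false)).1 &&
        !(start_wh.foldl (fun s wp => stepA rel s wp.2) (false, false, false)).2.2) then true
        else false)
      = ((start_wh.foldl (fun s wp => stepA rel s wp.2) (false, false, false)).2.1 &&
        (start_wh.foldl (fun s wp => stepA rel s wp.2) (false, false, false)).1 &&
        !(start_wh.foldl (fun s wp => stepA rel s wp.2) (false, false, false)).2.2) from
      by split <;> simp_all]
  rw [hA]
  unfold bFormula
  rfl
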